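-- pv_equiv track=rewrite | github.com/Xilinx/finn | src/finn/custom_op/fpgadataflow/fmpadding.py | characteristic_fx_output
-- ===== SOURCE A (Python) =====
-- def characteristic_fx_output(txns, cycles, counter, kwargs):
--     # Compute one period of the output characteristic function
--
--     (ImgDim, Padding, NumChannels, SIMD, TOTAL_ELS,NF) = kwargs
--
--
--     for i in range(0,TOTAL_ELS):
--         for j in range(int(NumChannels/SIMD)):
--             txns.append(counter)
--             counter+=1
--             cycles+=1
--
--     return txns, cycles, counter
-- ===== SOURCE B (Python) =====
-- def characteristic_fx_output(txns, cycles, counter, kwargs):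
--     # Closed-form count + one bulk fill instead of the nested increment loop.
--     (ImgDim, Padding, NumChannels, SIMD, TOTAL_ELS, NF) = kwargs
--     inner = int(NumChannels / SIMD)
--     n = TOTAL_ELS * inner if (TOTAL_ELS > 0 and inner > 0) else 0
--     txns.extend(range(counter, counter + n))
--     counter += n
--     cycles += n
--     return txns, cycles, counter
-- ===== Notes on version B (the rewrite author's own statement) =====
-- stated objective: faster
-- what changed: Replaced the nested counting loops by a closed-form element count (TOTAL_ELS * int(NumChannels/SIMD), clamped at 0) and one bulk range-extend of txns.
-- outside the precondition, e.g. on characteristic_fx_output([], 0, 0, (0, 0, 0, 0, 0, 0)): A returns ([], 0, 0), B raises ZeroDivisionError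
import Mathlib
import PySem

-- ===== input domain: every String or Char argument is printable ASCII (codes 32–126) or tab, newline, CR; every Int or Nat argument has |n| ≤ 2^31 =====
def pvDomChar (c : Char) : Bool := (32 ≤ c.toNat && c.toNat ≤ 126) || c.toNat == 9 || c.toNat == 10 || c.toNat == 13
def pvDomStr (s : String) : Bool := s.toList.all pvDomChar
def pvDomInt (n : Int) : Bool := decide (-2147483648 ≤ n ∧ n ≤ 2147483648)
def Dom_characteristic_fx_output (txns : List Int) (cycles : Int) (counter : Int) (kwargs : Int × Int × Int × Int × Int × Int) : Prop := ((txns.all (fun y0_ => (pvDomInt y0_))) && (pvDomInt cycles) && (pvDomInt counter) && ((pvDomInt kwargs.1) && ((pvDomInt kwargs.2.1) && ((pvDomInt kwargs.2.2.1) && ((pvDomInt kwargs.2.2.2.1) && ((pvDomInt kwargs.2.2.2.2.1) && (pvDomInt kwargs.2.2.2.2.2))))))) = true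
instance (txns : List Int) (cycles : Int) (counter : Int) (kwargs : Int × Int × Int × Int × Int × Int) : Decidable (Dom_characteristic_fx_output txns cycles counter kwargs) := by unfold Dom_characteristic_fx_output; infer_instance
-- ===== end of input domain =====

-- B replaces the nested increment loops by a closed-form count and one bulk range append (faster by a constant factor; no per-element loop).

-- ===== PORT A =====
-- int(NumChannels/SIMD): within Dom (|ints| ≤ 2^31) Python's float division followed by
-- int() truncation is exactly truncated integer division, Int.tdiv.
def characteristic_fx_output (txns : List Int) (cycles : Int) (counter : Int) (kwargs : Int × Int × Int × Int × Int × Int) : List Int × Int × Int :=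
  let NumChannels := kwargs.2.2.1
  let SIMD := kwargs.2.2.2.1
  let TOTAL_ELS := kwargs.2.2.2.2.1
  let st := (PySem.List.pyRange 0 TOTAL_ELS 1).foldl
    (fun (st : List Int × Int × Int) _ =>
      (PySem.List.pyRange 0 (Int.tdiv NumChannels SIMD) 1).foldl
        (fun (st : List Int × Int × Int) _ =>
          (st.1 ++ [st.2.2], st.2.1 + 1, st.2.2 + 1)) st)
    (txns, cycles, counter)
  (st.1, st.2.1, st.2.2)

-- ===== PORT B =====
def characteristic_fx_output_alt (txns : List Int) (cycles : Int) (counter : Int) (kwargs : Int × Int × Int × Int × Int × Int) : List Int × Int × Int :=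
  let NumChannels := kwargs.2.2.1
  let SIMD := kwargs.2.2.2.1
  let TOTAL_ELS := kwargs.2.2.2.2.1
  let inner := Int.tdiv NumChannels SIMD
  let n : Int := if TOTAL_ELS > 0 ∧ inner > 0 then TOTAL_ELS * inner else 0
  (txns ++ PySem.List.pyRange counter (counter + n) 1, cycles + n, counter + n)

-- ===== PRECONDITION & SPEC =====
-- Pre_ excludes SIMD = 0: B always computes int(NumChannels/SIMD) and raises ZeroDivisionError there, while A raises too unless TOTAL_ELS <= 0 leaves its loop (and the division) unexecuted.
def Pre_characteristic_fx_output (txns : List Int) (cycles : Int) (counter : Int) (kwargs : Int × Int × Int × Int × Int × Int) : Prop := kwargs.2.2.2.1 ≠ 0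
instance (txns : List Int) (cycles : Int) (counter : Int) (kwargs : Int × Int × Int × Int × Int × Int) : Decidable (Pre_characteristic_fx_output txns cycles counter kwargs) := by unfold Pre_characteristic_fx_output; infer_instance
def pvWitness_characteristic_fx_output : List Int × Int × Int × (Int × Int × Int × Int × Int × Int) := ([0, 1], 2, 3, (4, 1, 6, 2, 2, 1))

def Spec_characteristic_fx_output (txns : List Int) (cycles : Int) (counter : Int) (kwargs : Int × Int × Int × Int × Int × Int) (out : List Int × Int × Int) : Prop := out = characteristic_fx_output_alt txns cycles counter kwargs
instance (txns : List Int) (cycles : Int) (counter : Int) (kwargs : Int × Int × Int × Int × Int × Int) (out : List Int × Int × Int) : Decidable (Spec_characteristic_fx_output txns cycles counter kwargs out) := by unfold Spec_characteristic_fx_output; infer_instance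

-- ===== CLAIM (what is proved, stated in full; the proofs are below) =====
def Claim_equal_characteristic_fx_output : Prop := ∀ (txns : List Int) (cycles : Int) (counter : Int) (kwargs : Int × Int × Int × Int × Int × Int), Dom_characteristic_fx_output txns cycles counter kwargs → Pre_characteristic_fx_output txns cycles counter kwargs → Spec_characteristic_fx_output txns cycles counter kwargs (characteristic_fx_output txns cycles counter kwargs)

-- ===== LEMMAS AND PROOFS =====

-- The inner loop appends l.length consecutive counter values.
theorem pv_inner (l : List Int) (t : List Int) (cy co : Int) :
    l.foldl (fun (st : List Int × Int × Int) _ =>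
        (st.1 ++ [st.2.2], st.2.1 + 1, st.2.2 + 1)) (t, cy, co)
      = (t ++ PySem.List.pyRange co (co + l.length) 1, cy + l.length, co + l.length) := by
  induction l generalizing t cy co with
  | nil => simp [PySem.List.pyRange_one_eq_nil]
  | cons x xs ih =>
    simp only [List.foldl_cons]
    rw [ih]
    have hc : (((x :: xs).length : Nat) : Int) = (xs.length : Int) + 1 := by simp
    rw [hc]
    rw [PySem.List.pyRange_one_cons (show co < co + ((xs.length : Int) + 1) by omega)]
    simp only [Prod.mk.injEq]
    refine ⟨?_, by omega, by omega⟩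
    have e : co + ((xs.length : Int) + 1) = co + 1 + xs.length := by ring
    rw [e]
    simp [List.append_assoc]

-- The outer loop appends l.length blocks of m.toNat counter values each.
theorem pv_outer (l : List Int) (m : Int) (t : List Int) (cy co : Int) :
    l.foldl (fun (st : List Int × Int × Int) _ =>
        (PySem.List.pyRange 0 m 1).foldl
          (fun (st : List Int × Int × Int) _ =>
            (st.1 ++ [st.2.2], st.2.1 + 1, st.2.2 + 1)) st) (t, cy, co)
      = (t ++ PySem.List.pyRange co (co + l.length * m.toNat) 1,
          cy + l.length * m.toNat, co + l.length * m.toNat) := by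
  induction l generalizing t cy co with
  | nil => simp [PySem.List.pyRange_one_eq_nil]
  | cons x xs ih =>
    simp only [List.foldl_cons]
    rw [pv_inner, ih]
    have hlen : ((PySem.List.pyRange 0 m 1).length : Int) = (m.toNat : Int) := by
      rw [PySem.List.length_pyRange_one]; simp
    rw [hlen]
    have h1 : co ≤ co + (m.toNat : Int) := by omega
    have h2 : co + (m.toNat : Int) ≤ co + (m.toNat : Int) + (xs.length : Int) * (m.toNat : Int) := by
      nlinarith [Int.natCast_nonneg xs.length, Int.natCast_nonneg m.toNat]
    rw [List.append_assoc,
      ← PySem.List.pyRange_one_append co (co + (m.toNat : Int)) _ h1 h2]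
    simp only [Prod.mk.injEq, List.length_cons]
    refine ⟨?_, by push_cast; ring, by push_cast; ring⟩
    congr 2
    push_cast; ring

-- ===== VERDICT (by name: the statement is the Claim_ definition above) =====
theorem characteristic_fx_output_spec : Claim_equal_characteristic_fx_output := by
  intro txns cycles counter kwargs _ _
  unfold Spec_characteristic_fx_output characteristic_fx_output characteristic_fx_output_alt
  simp only []
  rw [pv_outer]
  set m := Int.tdiv kwargs.2.2.1 kwargs.2.2.2.1 with hm
  set T := kwargs.2.2.2.2.1 with hT
  have hK : ((PySem.List.pyRange 0 T 1).length : Int) = (T.toNat : Int) := by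
    rw [PySem.List.length_pyRange_one]; simp
  have hn : ((PySem.List.pyRange 0 T 1).length : Int) * (m.toNat : Int)
      = (if T > 0 ∧ m > 0 then T * m else 0) := by
    rw [hK]
    split_ifs with h
    · rw [Int.toNat_of_nonneg (le_of_lt h.1), Int.toNat_of_nonneg (le_of_lt h.2)]
    · by_cases hT0 : T ≤ 0
      · simp [Int.toNat_of_nonpos hT0]
      · have hm0 : m ≤ 0 := by
          rcases not_and_or.mp h with h1 | h2
          · omega
          · omega
        simp [Int.toNat_of_nonpos hm0]
  push_cast
  push_cast at hn
  rw [hn]
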